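-- pv_equiv track=rewrite | github.com/pypi-data/pypi-mirror-275 | packages/prettypretty/prettypretty-0.8.0.tar.gz/prettypretty-0.8.0/prettypretty/color/lores.py | approximate_rgb256_with_rgb6
-- ===== SOURCE A (Python) =====
-- _RGB6_TO_RGB256 = (0, 0x5F, 0x87, 0xAF, 0xD7, 0xFF)
--
-- def approximate_rgb256_with_rgb6(r: int, g: int, b: int) -> tuple[int, int, int]:
--     """
--     :bdg-warning:`Lossy conversion` Convert the given color from RGB256 to RGB6.
--
--     This function effectively reverses the conversion from RGB6 to RGB256: It
--     compares each RGB256 coordinate with the RGB256 values used for the inverse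
--     and picks the RGB6 with the closest RGB256 value for the inverse.
--
--     The correctness of this particular implementation depends on the inverse
--     mapping the extrema of the domain to the extrema of the codomain, i.e., 0 to
--     0 and 5 to 255.
--     """
--     assert 0 <= r <= 255 and 0 <= g <= 255 and 0 <= b <= 255
--
--     def convert(value: int) -> int:
--         for index, level in enumerate(_RGB6_TO_RGB256):
--             if value == level:
--                 return index
--             if value > level:
--                 continue
--
--             # The RGB256 value is between two RGB6 values. Pick the closer one.
--             previous_level = _RGB6_TO_RGB256[index - 1]
--             return index if level - value < value - previous_level else index - 1
--
--         assert False, 'unreachable statement'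
--
--     return convert(r), convert(g), convert(b)
-- ===== SOURCE B (Python) =====
-- _RGB6_TO_RGB256 = (0, 0x5F, 0x87, 0xAF, 0xD7, 0xFF)
--
-- def approximate_rgb256_with_rgb6(r: int, g: int, b: int) -> tuple[int, int, int]:
--     assert 0 <= r <= 255 and 0 <= g <= 255 and 0 <= b <= 255
--
--     def convert(value: int) -> int:
--         return min(range(6), key=lambda i: abs(value - _RGB6_TO_RGB256[i]))
--
--     return convert(r), convert(g), convert(b)
-- ===== Notes on version B (the rewrite author's own statement) =====
-- stated objective: simpler
-- what changed: Replaced the early-exit scan with explicit two-neighbor comparison by a single argmin over the six levels (min over range(6) keyed by absolute distance; min's first-minimizer rule reproduces A's tie-to-lower-index behaviour).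
import Mathlib
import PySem

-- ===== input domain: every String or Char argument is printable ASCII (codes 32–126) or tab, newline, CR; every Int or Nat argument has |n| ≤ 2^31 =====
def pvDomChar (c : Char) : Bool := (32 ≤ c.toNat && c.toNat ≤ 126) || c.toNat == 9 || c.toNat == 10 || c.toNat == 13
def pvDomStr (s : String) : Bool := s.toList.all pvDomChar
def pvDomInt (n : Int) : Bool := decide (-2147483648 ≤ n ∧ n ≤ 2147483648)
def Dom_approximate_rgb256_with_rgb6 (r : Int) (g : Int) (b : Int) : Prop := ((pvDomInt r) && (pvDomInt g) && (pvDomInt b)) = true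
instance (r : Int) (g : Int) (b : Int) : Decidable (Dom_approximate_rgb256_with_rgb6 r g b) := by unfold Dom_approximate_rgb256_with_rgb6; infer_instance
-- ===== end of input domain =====

-- B replaces A's early-exit scan + neighbor comparison by an argmin over the six levels; objective: simpler.


-- ===== PORT A =====
def rgb6ToRgb256 : List Int := [0, 0x5F, 0x87, 0xAF, 0xD7, 0xFF]

-- the 'for index, level in enumerate(...)' loop with its early returns; the
-- fall-through [] case is Python's unreachable 'assert False' (excluded by Pre_)
def convA_go (value : Int) : List (Int × Int) → Int
  | [] => 0
  | (index, level) :: rest =>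
    if value = level then index
    else if value > level then convA_go value rest
    else
      let previous_level := PySem.List.pyGetD rgb6ToRgb256 (index - 1) 0
      if level - value < value - previous_level then index else index - 1

def convA (value : Int) : Int := convA_go value (PySem.List.enumerate rgb6ToRgb256 0)

def approximate_rgb256_with_rgb6 (r : Int) (g : Int) (b : Int) : Int × Int × Int :=
  (convA r, convA g, convA b)

-- ===== PORT B =====
-- min(range(6), key=lambda i: abs(value - _RGB6_TO_RGB256[i])); min? returns the first minimizer
def convB (value : Int) : Int :=
  match PySem.List.min? (PySem.List.pyRange 0 6 1)
      (fun i => |value - PySem.List.pyGetD rgb6ToRgb256 i 0|) with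
  | some m => m
  | none => 0

def approximate_rgb256_with_rgb6_alt (r : Int) (g : Int) (b : Int) : Int × Int × Int :=
  (convB r, convB g, convB b)

-- ===== PRECONDITION & SPEC =====
-- exactly A's assert: each channel in [0, 255]; A raises AssertionError otherwise
def Pre_approximate_rgb256_with_rgb6 (r : Int) (g : Int) (b : Int) : Prop :=
  0 ≤ r ∧ r ≤ 255 ∧ 0 ≤ g ∧ g ≤ 255 ∧ 0 ≤ b ∧ b ≤ 255
instance (r : Int) (g : Int) (b : Int) : Decidable (Pre_approximate_rgb256_with_rgb6 r g b) := by unfold Pre_approximate_rgb256_with_rgb6; infer_instance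

def pvWitness_approximate_rgb256_with_rgb6 : Int × Int × Int := (3, 100, 255)

def Spec_approximate_rgb256_with_rgb6 (r : Int) (g : Int) (b : Int) (out : Int × Int × Int) : Prop := out = approximate_rgb256_with_rgb6_alt r g b
instance (r : Int) (g : Int) (b : Int) (out : Int × Int × Int) : Decidable (Spec_approximate_rgb256_with_rgb6 r g b out) := by unfold Spec_approximate_rgb256_with_rgb6; infer_instance

-- ===== CLAIM (what is proved, stated in full; the proofs are below) =====
def Claim_equal_approximate_rgb256_with_rgb6 : Prop := ∀ (r : Int) (g : Int) (b : Int), Dom_approximate_rgb256_with_rgb6 r g b → Pre_approximate_rgb256_with_rgb6 r g b → Spec_approximate_rgb256_with_rgb6 r g b (approximate_rgb256_with_rgb6 r g b)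

-- ===== LEMMAS AND PROOFS =====
set_option maxRecDepth 4000 in
lemma conv_all_eq :
    (PySem.List.pyRange 0 256 1).all (fun v => convA v == convB v) = true := by decide

lemma conv_eq (v : Int) (h0 : 0 ≤ v) (h1 : v ≤ 255) : convA v = convB v := by
  have hv : v ∈ PySem.List.pyRange 0 256 1 := by
    rw [PySem.List.mem_pyRange_one]; omega
  have := List.all_eq_true.mp conv_all_eq v hv
  exact of_decide_eq_true this

-- ===== VERDICT (by name: the statement is the Claim_ definition above) =====
theorem approximate_rgb256_with_rgb6_spec : Claim_equal_approximate_rgb256_with_rgb6 := by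
  intro r g b _ hpre
  obtain ⟨h1, h2, h3, h4, h5, h6⟩ := hpre
  show _ = _
  simp only [approximate_rgb256_with_rgb6, approximate_rgb256_with_rgb6_alt,
    conv_eq r h1 h2, conv_eq g h3 h4, conv_eq b h5 h6]
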